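-- pv_equiv track=rewrite | github.com/ganadara135/CorridorRoad | freecad/Corridor_Road/v1/ui/viewers/profile_review_view.py | _station_connection_row_color
-- ===== SOURCE A (Python) =====
-- def _station_connection_row_color(statuses: list[str]) -> tuple[int, int, int] | None:
--     normalized = {str(status or "").strip().lower() for status in list(statuses or [])}
--     if not normalized:
--         return None
--     if normalized == {"ok"}:
--         return (220, 245, 224)
--     if normalized.intersection({"error", "missing", "failed", "blocked"}):
--         return (255, 220, 220)
--     if normalized.intersection({"no_tin", "not_sampled", "no_hit", "partial", "warning", "stale"}):
--         return (255, 241, 205)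
--     return (238, 238, 238)
-- ===== SOURCE B (Python) =====
-- def _station_connection_row_color(statuses: list[str]) -> tuple[int, int, int] | None:
--     ERRORS = ("error", "missing", "failed", "blocked")
--     WARNINGS = ("no_tin", "not_sampled", "no_hit", "partial", "warning", "stale")
--     seen = False
--     all_ok = True
--     has_error = False
--     has_warning = False
--     for status in list(statuses or []):
--         v = str(status or "").strip().lower()
--         seen = True
--         if v != "ok":
--             all_ok = False
--         if v in ERRORS:
--             has_error = True
--         if v in WARNINGS:
--             has_warning = True
--     if not seen:
--         return None
--     if has_error:
--         return (255, 220, 220)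
--     if has_warning:
--         return (255, 241, 205)
--     if all_ok:
--         return (220, 245, 224)
--     return (238, 238, 238)
-- ===== Notes on version B (the rewrite author's own statement) =====
-- stated objective: alternative
-- what changed: Replaces the set comprehension plus set-equality/intersection tests with a single pass over the statuses maintaining four boolean flags (seen, all_ok, has_error, has_warning) and a flag-based decision afterwards.
import Mathlib
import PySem

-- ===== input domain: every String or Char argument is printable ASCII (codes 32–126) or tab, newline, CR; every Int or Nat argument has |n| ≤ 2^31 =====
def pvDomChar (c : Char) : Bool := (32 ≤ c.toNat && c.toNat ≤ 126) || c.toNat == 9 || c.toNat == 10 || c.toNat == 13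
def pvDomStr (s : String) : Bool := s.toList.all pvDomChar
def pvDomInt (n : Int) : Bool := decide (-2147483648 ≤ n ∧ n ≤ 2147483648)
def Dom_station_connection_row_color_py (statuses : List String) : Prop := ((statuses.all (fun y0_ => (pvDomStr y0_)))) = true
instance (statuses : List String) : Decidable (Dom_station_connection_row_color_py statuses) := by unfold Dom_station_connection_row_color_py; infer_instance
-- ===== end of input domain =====

-- B replaces A's set comprehension + set equality/intersection tests by one pass
-- accumulating four boolean flags; same cost, different decomposition (objective: alternative).


-- str(status or "").strip().lower()  (status is a string, so 'status or ""' is status itself,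
-- also when status = "": str("") = "")
def pvNorm (s : String) : String := PySem.Str.lower (PySem.Str.strip s)

-- ===== PORT A =====
def station_connection_row_color_py (statuses : List String) : Option (Int × Int × Int) :=
  let normalized : PySem.Set String := PySem.Set.ofList (statuses.map (fun status => pvNorm status))
  if normalized = [] then none
  else if PySem.Set.equal normalized (PySem.Set.ofList ["ok"]) then some (220, 245, 224)
  else if PySem.Set.inter normalized (PySem.Set.ofList ["error", "missing", "failed", "blocked"]) ≠ [] then some (255, 220, 220)
  else if PySem.Set.inter normalized (PySem.Set.ofList ["no_tin", "not_sampled", "no_hit", "partial", "warning", "stale"]) ≠ [] then some (255, 241, 205)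
  else some (238, 238, 238)

-- ===== PORT B =====
-- loop body of Source B: state (seen, all_ok, has_error, has_warning)
def pvStep (acc : Bool × Bool × Bool × Bool) (v : String) : Bool × Bool × Bool × Bool :=
  (true,
   acc.2.1 && (v == "ok"),
   acc.2.2.1 || ["error", "missing", "failed", "blocked"].contains v,
   acc.2.2.2 || ["no_tin", "not_sampled", "no_hit", "partial", "warning", "stale"].contains v)

def station_connection_row_color_py_alt (statuses : List String) : Option (Int × Int × Int) :=
  let st := statuses.foldl (fun acc status => pvStep acc (pvNorm status)) (false, true, false, false)
  if !st.1 then none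
  else if st.2.2.1 then some (255, 220, 220)
  else if st.2.2.2 then some (255, 241, 205)
  else if st.2.1 then some (220, 245, 224)
  else some (238, 238, 238)

-- ===== PRECONDITION & SPEC =====
def Spec_station_connection_row_color_py (statuses : List String) (out : Option (Int × Int × Int)) : Prop := out = station_connection_row_color_py_alt statuses
instance (statuses : List String) (out : Option (Int × Int × Int)) : Decidable (Spec_station_connection_row_color_py statuses out) := by unfold Spec_station_connection_row_color_py; infer_instance

-- ===== CLAIM (what is proved, stated in full; the proofs are below) =====
def Claim_equal_station_connection_row_color_py : Prop := ∀ (statuses : List String), Dom_station_connection_row_color_py statuses → Spec_station_connection_row_color_py statuses (station_connection_row_color_py statuses)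

-- ===== LEMMAS AND PROOFS =====

theorem pvFold_char (ys : List String) (a b c d : Bool) :
    ys.foldl pvStep (a, b, c, d) =
      (a || !ys.isEmpty,
       b && ys.all (· == "ok"),
       c || ys.any (["error", "missing", "failed", "blocked"].contains ·),
       d || ys.any (["no_tin", "not_sampled", "no_hit", "partial", "warning", "stale"].contains ·)) := by
  induction ys generalizing a b c d with
  | nil => simp
  | cons y t ih => simp [pvStep, ih, Bool.and_assoc, Bool.or_assoc]

theorem pvInter_ne_nil (ys L : List String) :
    (PySem.Set.inter (PySem.Set.ofList ys) L ≠ []) ↔ ys.any (L.contains ·) = true := by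
  constructor
  · intro h
    rcases List.exists_mem_of_ne_nil _ h with ⟨x, hx⟩
    rw [PySem.Set.inter, List.mem_filter] at hx
    exact List.any_eq_true.2 ⟨x, (PySem.Set.mem_ofList _ _).1 hx.1, hx.2⟩
  · intro h hnil
    rcases List.any_eq_true.1 h with ⟨x, hx, hc⟩
    have : x ∈ PySem.Set.inter (PySem.Set.ofList ys) L :=
      List.mem_filter.2 ⟨(PySem.Set.mem_ofList _ _).2 hx, hc⟩
    simp [hnil] at this

theorem pvEqual_ok (ys : List String) (h : ys ≠ []) :
    PySem.Set.equal (PySem.Set.ofList ys) (PySem.Set.ofList ["ok"]) = ys.all (· == "ok") := by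
  have hok : PySem.Set.ofList ["ok"] = ["ok"] := by decide
  rw [hok, PySem.Set.equal]
  cases hall : ys.all (· == "ok") with
  | true =>
    simp only [Bool.and_eq_true, PySem.Set.issubset, PySem.Set.contains, List.all_eq_true]
    constructor
    · intro x hx
      have := List.all_eq_true.1 hall x ((PySem.Set.mem_ofList _ _).1 hx)
      simp only [beq_iff_eq] at this
      simp [this]
    · intro x hx
      simp only [List.mem_singleton] at hx
      subst hx
      rcases List.exists_mem_of_ne_nil _ h with ⟨y, hy⟩
      have hyo := List.all_eq_true.1 hall y hy
      simp only [beq_iff_eq] at hyo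
      have hmem : "ok" ∈ PySem.Set.ofList ys := (PySem.Set.mem_ofList _ _).2 (hyo ▸ hy)
      simpa [List.contains_eq_mem] using hmem
  | false =>
    rcases List.all_eq_false.1 hall with ⟨y, hy, hne⟩
    simp only [beq_iff_eq] at hne
    apply Bool.and_eq_false_iff.2
    left
    rw [PySem.Set.issubset, List.all_eq_false]
    exact ⟨y, (PySem.Set.mem_ofList _ _).2 hy, by simp [PySem.Set.contains, hne]⟩

theorem pvAllOk_no_hit (ys L : List String) (hL : L.contains "ok" = false)
    (hall : ys.all (· == "ok") = true) : ys.any (L.contains ·) = false := by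
  rw [List.any_eq_false]
  intro x hx
  have := List.all_eq_true.1 hall x hx
  simp only [beq_iff_eq] at this
  subst this
  simpa [List.contains_eq_mem] using hL

theorem pvInter_eq_nil (ys L : List String) :
    (PySem.Set.inter (PySem.Set.ofList ys) L = []) ↔ ys.any (L.contains ·) = false := by
  constructor
  · intro h
    by_contra hc
    exact (pvInter_ne_nil ys L).2 (by simpa using hc) h
  · intro h
    by_contra hc
    rw [(pvInter_ne_nil ys L).1 hc] at h
    cases h

-- ===== VERDICT (by name: the statement is the Claim_ definition above) =====
theorem station_connection_row_color_py_spec : Claim_equal_station_connection_row_color_py := by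
  intro statuses _
  unfold Spec_station_connection_row_color_py
  cases statuses with
  | nil => rfl
  | cons s ss =>
    set ys : List String := (s :: ss).map (fun status => pvNorm status) with hys
    have hysne : ys ≠ [] := by simp [hys]
    have hne : PySem.Set.ofList ys ≠ [] := by
      intro hnil
      have hm : pvNorm s ∈ PySem.Set.ofList ys := (PySem.Set.mem_ofList _ _).2 (by simp [hys])
      simp [hnil] at hm
    have hE : PySem.Set.ofList ["error", "missing", "failed", "blocked"]
        = ["error", "missing", "failed", "blocked"] := by decide
    have hW : PySem.Set.ofList ["no_tin", "not_sampled", "no_hit", "partial", "warning", "stale"]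
        = ["no_tin", "not_sampled", "no_hit", "partial", "warning", "stale"] := by decide
    have hEmpty : ys.isEmpty = false := by rw [hys]; rfl
    rw [station_connection_row_color_py_alt]
    rw [show (s :: ss).foldl (fun acc status => pvStep acc (pvNorm status)) (false, true, false, false)
          = ys.foldl pvStep (false, true, false, false) from List.foldl_map.symm]
    rw [pvFold_char, station_connection_row_color_py]
    simp only [← hys, hE, hW, hEmpty, Bool.false_or, Bool.true_and, Bool.not_false, Bool.not_true]
    rw [if_neg hne, if_neg (by simp : ¬(false = true)), pvEqual_ok ys hysne]
    by_cases hall : ys.all (· == "ok") = true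
    · have he := pvAllOk_no_hit ys ["error", "missing", "failed", "blocked"] (by decide) hall
      have hw := pvAllOk_no_hit ys ["no_tin", "not_sampled", "no_hit", "partial", "warning", "stale"] (by decide) hall
      simp only [hall, he, hw]
      simp
    · have hall' : ys.all (· == "ok") = false := by simpa using hall
      by_cases herr : ys.any (["error", "missing", "failed", "blocked"].contains ·) = true
      · have hi := (pvInter_ne_nil ys ["error", "missing", "failed", "blocked"]).2 herr
        simp only [hall', herr]
        simp [hi]
      · have herr' : ys.any (["error", "missing", "failed", "blocked"].contains ·) = false := by
          simpa using herr
        have hi1 := (pvInter_eq_nil ys ["error", "missing", "failed", "blocked"]).2 herr'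
        by_cases hwarn : ys.any (["no_tin", "not_sampled", "no_hit", "partial", "warning", "stale"].contains ·) = true
        · have hi2 := (pvInter_ne_nil ys ["no_tin", "not_sampled", "no_hit", "partial", "warning", "stale"]).2 hwarn
          simp only [hall', herr', hwarn]
          simp [hi1, hi2]
        · have hwarn' : ys.any (["no_tin", "not_sampled", "no_hit", "partial", "warning", "stale"].contains ·) = false := by
            simpa using hwarn
          have hi2 := (pvInter_eq_nil ys ["no_tin", "not_sampled", "no_hit", "partial", "warning", "stale"]).2 hwarn'
          simp only [hall', herr', hwarn']
          simp [hi1, hi2]
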